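-- pv_equiv track=rewrite | github.com/JudgeZ/parser-lineage-analyzer | parser_lineage_analyzer/_analysis_templates.py | _template_spans
-- ===== SOURCE A (Python) =====
-- def _template_spans(text: str) -> list[tuple[int, int, str]]:
--     spans: list[tuple[int, int, str]] = []
--     start = 0
--     while True:
--         marker = text.find("%{", start)
--         if marker == -1:
--             return spans
--         close = text.find("}", marker + 2)
--         if close == -1:
--             start = marker + 2
--             continue
--         if close > marker + 2:
--             spans.append((marker, close + 1, text[marker + 2 : close]))
--         start = close + 1
-- ===== SOURCE B (Python) =====
-- import re
--
-- _MARKER_RE = re.compile(r"%\{([^}]*)\}")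
--
-- def _template_spans(text: str) -> list[tuple[int, int, str]]:
--     return [
--         (m.start(), m.end(), m.group(1))
--         for m in _MARKER_RE.finditer(text)
--         if m.group(1)
--     ]
-- ===== Notes on version B (the rewrite author's own statement) =====
-- stated objective: idiomatic
-- what changed: The manual while-loop with two str.find calls and explicit cursor bookkeeping is replaced by a single compiled-regex finditer comprehension over the pattern %\{([^}]*)\}, whose non-overlapping left-to-right matching and the if m.group(1) filter reproduce A's advance and non-empty-content guard.
import Mathlib
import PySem

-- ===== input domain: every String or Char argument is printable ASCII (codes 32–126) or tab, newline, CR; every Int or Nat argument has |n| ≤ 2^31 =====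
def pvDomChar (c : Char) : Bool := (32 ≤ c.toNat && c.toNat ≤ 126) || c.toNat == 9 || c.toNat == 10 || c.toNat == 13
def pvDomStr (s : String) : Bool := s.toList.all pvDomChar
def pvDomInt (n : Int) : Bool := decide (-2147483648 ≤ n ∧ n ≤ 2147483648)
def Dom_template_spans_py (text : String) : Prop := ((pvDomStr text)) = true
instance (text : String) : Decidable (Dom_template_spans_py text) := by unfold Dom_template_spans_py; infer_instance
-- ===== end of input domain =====

-- B replaces A's manual while-loop (two str.find calls and cursor bookkeeping) by one regex
-- finditer comprehension over %\{([^}]*)\}; equivalence proved for the return value on all inputs.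

-- ===== PORT A =====
-- Transliteration of A's while-loop: `marker = text.find("%{", start)` / `close = text.find("}", marker+2)`
-- are PySem.Chars.findFrom (-1 = not found, as in Python); the fuel argument is only a totality guard
-- (each iteration moves `start` strictly forward and never past len(text), so length+2 fuel always suffices).
def aLoopF : Nat → List Char → Nat → List (Int × Int × String) → List (Int × Int × String)
  | 0, _, _, spans => spans
  | fuel + 1, cs, start, spans =>
    let marker := PySem.Chars.findFrom cs ['%', '{'] (start : Int)
    if marker = -1 then spans
    else
      let close := PySem.Chars.findFrom cs ['}'] (marker + 2)
      if close = -1 then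
        aLoopF fuel cs (marker.toNat + 2) spans   -- start = marker + 2; continue  (marker ≥ 0 here, so toNat is exact)
      else
        -- text[marker + 2 : close] is the Python slice; close + 1 the new cursor (close ≥ 0 here)
        let spans' := if marker + 2 < close
          then spans ++ [(marker, close + 1, String.ofList (PySem.List.slice cs (some (marker + 2)) (some close)))]
          else spans
        aLoopF fuel cs (close.toNat + 1) spans'

def template_spans_py (text : String) : List (Int × Int × String) :=
  aLoopF (text.toList.length + 2) text.toList 0 []

-- ===== PORT B =====
-- Hand port of re.finditer(r"%\{([^}]*)\}", text) for this fixed pattern (exact: the engine tries each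
-- position left to right; at a position a match needs literal '%','{', then [^}]* — the longest run of
-- non-'}' chars — then literal '}'; on success it emits the match and resumes right after it, else it
-- advances one position).  The `if content.isEmpty` filter is Source B's `if m.group(1)`.
def bScan (cs : List Char) (i : Nat) : List (Int × Int × String) :=
  match cs with
  | [] => []
  | c :: rest =>
    if c = '%' ∧ rest.head? = some '{' then
      let content := rest.tail.takeWhile (· ≠ '}')
      match hdw : rest.tail.dropWhile (· ≠ '}') with
      | '}' :: tail =>
        (if content.isEmpty then []
         else [((i : Int), (i : Int) + content.length + 3, String.ofList content)])
          ++ bScan tail (i + content.length + 3)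
      | _ => bScan rest (i + 1)
    else bScan rest (i + 1)
termination_by cs.length
decreasing_by
  · have h1 : (rest.tail.dropWhile (· ≠ '}')).length ≤ rest.tail.length := List.length_dropWhile_le _ _
    rw [hdw] at h1
    cases rest with
    | nil => simp at h1
    | cons d r => simp at h1 ⊢; omega
  · simp
  · simp

def template_spans_py_alt (text : String) : List (Int × Int × String) :=
  bScan text.toList 0

-- ===== PRECONDITION & SPEC =====
def Spec_template_spans_py (text : String) (out : List (Int × Int × String)) : Prop := out = template_spans_py_alt text
instance (text : String) (out : List (Int × Int × String)) : Decidable (Spec_template_spans_py text out) := by unfold Spec_template_spans_py; infer_instance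

-- ===== CLAIM (what is proved, stated in full; the proofs are below) =====
def Claim_equal_template_spans_py : Prop := ∀ (text : String), Dom_template_spans_py text → Spec_template_spans_py text (template_spans_py text)

-- ===== LEMMAS AND PROOFS =====

-- One step of the scanner at a position where no match can start.
theorem bScan_cons_not (c : Char) (rest : List Char) (i : Nat)
    (h : ¬ (c = '%' ∧ rest.head? = some '{')) :
    bScan (c :: rest) i = bScan rest (i + 1) := by
  rw [bScan]
  simp [h]

-- A match can start at the head iff ['%','{'] is a prefix.
theorem cond_iff_prefix (c : Char) (rest : List Char) :
    (c = '%' ∧ rest.head? = some '{') ↔ ['%', '{'] <+: (c :: rest) := by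
  constructor
  · rintro ⟨rfl, hh⟩
    cases rest with
    | nil => simp at hh
    | cons d r =>
      simp at hh
      subst hh
      exact ⟨r, rfl⟩
  · rintro ⟨t, ht⟩
    cases rest with
    | nil => simp at ht
    | cons d r =>
      simp at ht
      obtain ⟨h1, h2, _⟩ := ht
      exact ⟨h1.symm, by simp [← h2]⟩

-- The scanner at a successful match position.
theorem bScan_match (body : List Char) (i : Nat) (t : List Char)
    (hdw : body.dropWhile (· ≠ '}') = '}' :: t) :
    bScan ('%' :: '{' :: body) i =
      (if (body.takeWhile (· ≠ '}')).isEmpty then []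
       else [((i : Int), (i : Int) + (body.takeWhile (· ≠ '}')).length + 3,
              String.ofList (body.takeWhile (· ≠ '}')))])
        ++ bScan t (i + (body.takeWhile (· ≠ '}')).length + 3) := by
  rw [bScan]
  rw [if_pos (⟨rfl, rfl⟩ : ('%' = '%' ∧ (('{' :: body) : List Char).head? = some '{'))]
  simp only [List.tail_cons]
  split
  · rename_i tail1 heq
    rw [hdw] at heq
    cases heq
    rfl
  · rename_i heq
    exact absurd hdw (heq t)

-- The scanner at a failed match attempt (no closing brace): retry one position later.
theorem bScan_nomatch (body : List Char) (i : Nat)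
    (hdw : body.dropWhile (· ≠ '}') = []) :
    bScan ('%' :: '{' :: body) i = bScan ('{' :: body) (i + 1) := by
  rw [bScan]
  rw [if_pos (⟨rfl, rfl⟩ : ('%' = '%' ∧ (('{' :: body) : List Char).head? = some '{'))]
  simp only [List.tail_cons]
  split
  · rename_i tail1 heq
    rw [hdw] at heq
    cases heq
  · rfl

-- If "%{" does not occur in s, the scanner finds nothing.
theorem bScan_nil_of_not_infix (s : List Char) (i : Nat)
    (h : ¬ ['%', '{'] <:+: s) : bScan s i = [] := by
  induction s generalizing i with
  | nil => rw [bScan]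
  | cons c rest ih =>
    have hc : ¬ (c = '%' ∧ rest.head? = some '{') := fun hcp =>
      h ((cond_iff_prefix c rest).mp hcp).isInfix
    rw [bScan_cons_not c rest i hc]
    exact ih (i + 1) (fun hinf => h (hinf.trans (List.suffix_cons c rest).isInfix))

-- If '}' does not occur in s, the scanner finds nothing.
theorem bScan_nil_of_no_brace (s : List Char) (i : Nat)
    (h : '}' ∉ s) : bScan s i = [] := by
  induction s generalizing i with
  | nil => rw [bScan]
  | cons c rest ih =>
    have hrest : '}' ∉ rest := fun hx => h (List.mem_cons_of_mem c hx)
    by_cases hc : (c = '%' ∧ rest.head? = some '{')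
    · obtain ⟨rfl, hh⟩ := hc
      cases rest with
      | nil => simp at hh
      | cons d r =>
        simp at hh
        subst hh
        have hnb : '}' ∉ r := fun hx => hrest (List.mem_cons_of_mem _ hx)
        have hdw : r.dropWhile (· ≠ '}') = [] := by
          rw [List.dropWhile_eq_nil_iff]
          intro x hx
          simp only [decide_eq_true_eq]
          rintro rfl
          exact hnb hx
        rw [bScan_nomatch r i hdw]
        exact ih (i + 1) hrest
    · rw [bScan_cons_not c rest i hc]
      exact ih (i + 1) hrest

-- Positions with no match are skipped one by one.
theorem bScan_skip (n : Nat) (s : List Char) (i : Nat)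
    (h : ∀ j < n, ¬ ['%', '{'] <+: s.drop j) :
    bScan s i = bScan (s.drop n) (i + n) := by
  induction n generalizing s i with
  | zero => simp
  | succ n ih =>
    cases s with
    | nil => simp only [List.drop_nil]; rw [bScan, bScan]
    | cons c rest =>
      have h0 : ¬ ['%', '{'] <+: (c :: rest) := by simpa using h 0 (by omega)
      have hc : ¬ (c = '%' ∧ rest.head? = some '{') := fun hcp =>
        h0 ((cond_iff_prefix c rest).mp hcp)
      rw [bScan_cons_not c rest i hc]
      have hrec := ih rest (i + 1) (fun j hj => by
        have := h (j + 1) (by omega)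
        simpa using this)
      rw [hrec, List.drop_succ_cons]
      congr 1
      omega

-- takeWhile/dropWhile at the first occurrence of '}'.
theorem takeWhile_at_first_brace (s : List Char) (o : Nat)
    (ho : ['}'] <+: s.drop o) (hmin : ∀ j < o, ¬ ['}'] <+: s.drop j) :
    s.takeWhile (· ≠ '}') = s.take o ∧ s.dropWhile (· ≠ '}') = s.drop o := by
  induction s generalizing o with
  | nil => simp at ho
  | cons c rest ih =>
    cases o with
    | zero =>
      simp only [List.drop_zero] at ho
      obtain ⟨t, ht⟩ := ho
      simp only [List.cons_append, List.nil_append, List.cons.injEq] at ht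
      have hcb : c = '}' := ht.1.symm
      subst hcb
      simp
    | succ o =>
      have h0 : ¬ ['}'] <+: (c :: rest) := by simpa using hmin 0 (by omega)
      have hcb : c ≠ '}' := by
        rintro rfl
        exact h0 ⟨rest, rfl⟩
      have hrec := ih o (by simpa using ho) (fun j hj => by
        have := hmin (j + 1) (by omega)
        simpa using this)
      constructor
      · rw [List.takeWhile_cons, if_pos (by simp [hcb]), hrec.1, List.take_succ_cons]
      · rw [List.dropWhile_cons, if_pos (by simp [hcb]), hrec.2, List.drop_succ_cons]

-- A's loop, one step: no marker found.
theorem aLoopF_none (fuel : Nat) (cs : List Char) (start : Nat) (spans : List (Int × Int × String))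
    (hm : PySem.Chars.findFrom cs ['%', '{'] (start : Int) = -1) :
    aLoopF (fuel + 1) cs start spans = spans := by
  rw [aLoopF]
  simp [hm]

-- A's loop, one step: marker found but no closing brace.
theorem aLoopF_noclose (fuel : Nat) (cs : List Char) (start : Nat) (spans : List (Int × Int × String))
    (marker : Int)
    (hmk : PySem.Chars.findFrom cs ['%', '{'] (start : Int) = marker) (hm : marker ≠ -1)
    (hck : PySem.Chars.findFrom cs ['}'] (marker + 2) = -1) :
    aLoopF (fuel + 1) cs start spans = aLoopF fuel cs (marker.toNat + 2) spans := by
  rw [aLoopF]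
  simp [hmk, hck, hm]

-- A's loop, one step: marker and closing brace found.
theorem aLoopF_close (fuel : Nat) (cs : List Char) (start : Nat) (spans : List (Int × Int × String))
    (marker close : Int)
    (hmk : PySem.Chars.findFrom cs ['%', '{'] (start : Int) = marker) (hm : marker ≠ -1)
    (hck : PySem.Chars.findFrom cs ['}'] (marker + 2) = close) (hc : close ≠ -1) :
    aLoopF (fuel + 1) cs start spans = aLoopF fuel cs (close.toNat + 1)
      (if marker + 2 < close
       then spans ++ [(marker, close + 1, String.ofList (PySem.List.slice cs (some (marker + 2)) (some close)))]
       else spans) := by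
  rw [aLoopF]
  simp [hmk, hck, hm, hc]

-- Main loop invariant: A's loop from cursor `start` produces exactly the scanner's matches in the suffix.
theorem aLoopF_eq (fuel : Nat) : ∀ (cs : List Char) (start : Nat) (spans : List (Int × Int × String)),
    start ≤ cs.length → cs.length - start < fuel →
    aLoopF fuel cs start spans = spans ++ bScan (cs.drop start) start := by
  induction fuel with
  | zero => intro cs start spans hle hfuel; omega
  | succ fuel ih =>
    intro cs start spans hle hfuel
    by_cases hm : PySem.Chars.findFrom cs ['%', '{'] (start : Int) = -1
    · -- no marker: both sides are spans
      have hnoinf : ¬ ['%', '{'] <:+: cs.drop start :=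
        (PySem.Chars.findFrom_natCast_eq_neg_one_iff cs ['%', '{'] start hle).mp hm
      rw [aLoopF_none fuel cs start spans hm, bScan_nil_of_not_infix _ _ hnoinf, List.append_nil]
    · have hspec := PySem.Chars.findFrom_natCast_spec cs ['%', '{'] start hle hm
      obtain ⟨marker, hmk⟩ : ∃ v, PySem.Chars.findFrom cs ['%', '{'] (start : Int) = v := ⟨_, rfl⟩
      rw [hmk] at hspec hm
      have h0m : 0 ≤ marker := le_trans (Int.natCast_nonneg start) hspec.1
      obtain ⟨m, hmcast⟩ : ∃ n : Nat, marker = (n : Int) := ⟨marker.toNat, (Int.toNat_of_nonneg h0m).symm⟩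
      have hmtoNat : marker.toNat = m := by omega
      rw [hmcast, Int.toNat_natCast] at hspec
      have hsm : start ≤ m := by
        have := hspec.1
        omega
      obtain ⟨body, hbody⟩ : ∃ body, cs.drop m = '%' :: '{' :: body := by
        obtain ⟨t, ht⟩ := hspec.2.1
        exact ⟨t, by simpa using ht.symm⟩
      have hlen : cs.length - m = body.length + 2 := by
        have := congrArg List.length hbody
        simp at this
        omega
      have hm2 : m + 2 ≤ cs.length := by omega
      -- skip to the marker on the B side
      have hskip : bScan (cs.drop start) start = bScan (cs.drop m) m := by
        have hs := bScan_skip (m - start) (cs.drop start) start (fun j hj => by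
          rw [List.drop_drop]
          exact hspec.2.2 (start + j) (by omega) (by omega))
        rw [List.drop_drop] at hs
        have e1 : start + (m - start) = m := by omega
        rw [e1] at hs
        exact hs
      have hbodydrop : cs.drop (m + 2) = body := by
        have h2 : cs.drop (m + 2) = (cs.drop m).drop 2 := by
          rw [List.drop_drop]
        rw [h2, hbody]
        rfl
      have hcast2 : (marker + 2 : Int) = ((m + 2 : Nat) : Int) := by
        rw [hmcast]
        push_cast
        ring
      by_cases hcl : PySem.Chars.findFrom cs ['}'] (marker + 2) = -1
      · -- no closing brace after the marker: both sides are spans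
        have hnob : ¬ ['}'] <:+: cs.drop (m + 2) := by
          refine (PySem.Chars.findFrom_natCast_eq_neg_one_iff cs ['}'] (m + 2) hm2).mp ?_
          rw [← hcast2, ← hmk]
          rw [hmk]
          exact hcl
        have hnomem : '}' ∉ body := by
          rw [← hbodydrop]
          intro hmem
          obtain ⟨l₁, l₂, hsplit⟩ := List.append_of_mem hmem
          exact hnob ⟨l₁, l₂, by rw [hsplit]; simp⟩
        have hA := ih cs (m + 2) spans hm2 (by omega)
        rw [hbodydrop] at hA
        have hBnil : bScan body (m + 2) = [] := bScan_nil_of_no_brace body (m + 2) hnomem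
        have hdw : body.dropWhile (· ≠ '}') = [] := by
          rw [List.dropWhile_eq_nil_iff]
          intro x hx
          simp only [decide_eq_true_eq]
          rintro rfl
          exact hnomem hx
        have hBside : bScan (cs.drop m) m = [] := by
          rw [hbody, bScan_nomatch body m hdw]
          refine bScan_nil_of_no_brace _ _ ?_
          intro hmem
          rcases List.mem_cons.mp hmem with h1 | h1
          · exact absurd h1 (by decide)
          · exact hnomem h1
        rw [aLoopF_noclose fuel cs start spans marker hmk hm hcl, hmtoNat, hA, hBnil,
            hskip, hBside]
      · -- closing brace found
        obtain ⟨close, hck⟩ : ∃ v, PySem.Chars.findFrom cs ['}'] (marker + 2) = v := ⟨_, rfl⟩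
        rw [hck] at hcl
        have hcl' : PySem.Chars.findFrom cs ['}'] ((m + 2 : Nat) : Int) ≠ -1 := by
          rw [← hcast2, hck]
          exact hcl
        have hspec2 := PySem.Chars.findFrom_natCast_spec cs ['}'] (m + 2) hm2 hcl'
        rw [← hcast2, hck] at hspec2
        have h0c : 0 ≤ close := le_trans (Int.natCast_nonneg (m + 2)) (hcast2 ▸ hspec2.1)
        obtain ⟨cN, hccast⟩ : ∃ n : Nat, close = (n : Int) := ⟨close.toNat, (Int.toNat_of_nonneg h0c).symm⟩
        have hctoNat : close.toNat = cN := by omega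
        rw [hccast, Int.toNat_natCast] at hspec2
        have hm2c : m + 2 ≤ cN := by
          have := hspec2.1
          omega
        obtain ⟨o, ho⟩ : ∃ o, cN = m + 2 + o := ⟨cN - (m + 2), by omega⟩
        -- the closing brace inside body
        have hdropbody : ∀ j : Nat, body.drop j = cs.drop (m + 2 + j) := by
          intro j
          rw [← hbodydrop, List.drop_drop]
        have hobrace : ['}'] <+: body.drop o := by
          rw [hdropbody, ← ho]
          exact hspec2.2.1
        have hominb : ∀ j < o, ¬ ['}'] <+: body.drop j := by
          intro j hj
          rw [hdropbody]
          exact hspec2.2.2 (m + 2 + j) (by omega) (by omega)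
        obtain ⟨htw, hdw⟩ := takeWhile_at_first_brace body o hobrace hominb
        obtain ⟨t2, ht2⟩ : ∃ t2, body.drop o = '}' :: t2 := by
          obtain ⟨t, ht⟩ := hobrace
          exact ⟨t, by simpa using ht.symm⟩
        have holt : o < body.length := by
          have := congrArg List.length ht2
          simp at this
          omega
        have ht2tail : t2 = cs.drop (cN + 1) := by
          have e3 : t2 = body.drop (o + 1) := by
            have := congrArg (List.drop 1) ht2
            simpa [List.drop_drop] using this.symm
          rw [e3, hdropbody]
          congr 1
          omega
        have hcN1 : cN + 1 ≤ cs.length := by omega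
        have hcontentlen : (body.take o).length = o := by
          simp [List.length_take]
          omega
        -- unfold the B side at the marker
        have hBside : bScan (cs.drop m) m =
            (if o = 0 then []
             else [((m : Int), (m : Int) + o + 3, String.ofList (body.take o))])
              ++ bScan (cs.drop (cN + 1)) (cN + 1) := by
          rw [hbody, bScan_match body m t2 (by rw [hdw, ht2]), htw, hcontentlen, ht2tail]
          have e4 : m + o + 3 = cN + 1 := by omega
          rw [e4]
          congr 1
          by_cases hoz : o = 0
          · rw [if_pos (by simp [hoz]), if_pos hoz]
          · rw [if_neg (by simp [List.isEmpty_iff, ← List.length_eq_zero_iff, hcontentlen, hoz]), if_neg hoz]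
        -- A side
        rw [aLoopF_close fuel cs start spans marker close hmk hm hck hcl, hctoNat]
        have hA := ih cs (cN + 1)
          (if marker + 2 < close
           then spans ++ [(marker, close + 1, String.ofList (PySem.List.slice cs (some (marker + 2)) (some close)))]
           else spans) hcN1 (by omega)
        rw [hA, hskip, hBside]
        have hslice : PySem.List.slice cs (some (marker + 2)) (some close) = body.take o := by
          rw [hcast2, hccast, PySem.List.slice_natCast, hbodydrop]
          congr 1
          omega
        by_cases hoz : o = 0
        · rw [if_neg (by rw [hmcast, hccast]; omega), if_pos hoz]
          simp
        · rw [if_pos (by rw [hmcast, hccast]; omega), if_neg hoz]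
          have htup : (marker, close + 1, String.ofList (PySem.List.slice cs (some (marker + 2)) (some close)))
              = ((m : Int), (m : Int) + o + 3, String.ofList (body.take o)) := by
            rw [hslice, hmcast, hccast]
            have e5 : ((cN : Int)) + 1 = (m : Int) + o + 3 := by omega
            rw [e5]
          rw [htup]
          simp

-- ===== VERDICT (by name: the statement is the Claim_ definition above) =====
theorem template_spans_py_spec : Claim_equal_template_spans_py := by
  intro text _
  unfold Spec_template_spans_py template_spans_py template_spans_py_alt
  simpa using aLoopF_eq (text.toList.length + 2) text.toList 0 [] (by omega) (by omega)
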